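-- pv_equiv track=rewrite | github.com/iz0morph/Python | Домашнее задание №5/task_5.py | ascii_table
-- ===== SOURCE A (Python) =====
-- def ascii_table(a, b, temp):
--     if temp == 127:
--         return f'{temp} - {chr(temp)}'
--     if (temp - a) % 10 == 0 and temp != 32:
--         el = f'{temp} - {chr(temp)} '
--         return '\n' + el + ascii_table(a, b, temp + 1)
--     else:
--         el = f'{temp} - {chr(temp)} '
--         return el + ascii_table(a, b, temp + 1)
-- ===== SOURCE B (Python) =====
-- def ascii_table(a, b, temp):
--     res = ''
--     for t in range(temp, 127):
--         el = f'{t} - {chr(t)} '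
--         res += '\n' + el if (t - a) % 10 == 0 and t != 32 else el
--     res += f'{127} - {chr(127)}'
--     return res
-- ===== Notes on version B (the rewrite author's own statement) =====
-- stated objective: simpler
-- what changed: Replaces A's recursion (one stack frame per remaining code point, building the string from the back) with a single iterative loop over range(temp, 127) that appends each entry to a string accumulator, then appends the final 127 entry.
import Mathlib
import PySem

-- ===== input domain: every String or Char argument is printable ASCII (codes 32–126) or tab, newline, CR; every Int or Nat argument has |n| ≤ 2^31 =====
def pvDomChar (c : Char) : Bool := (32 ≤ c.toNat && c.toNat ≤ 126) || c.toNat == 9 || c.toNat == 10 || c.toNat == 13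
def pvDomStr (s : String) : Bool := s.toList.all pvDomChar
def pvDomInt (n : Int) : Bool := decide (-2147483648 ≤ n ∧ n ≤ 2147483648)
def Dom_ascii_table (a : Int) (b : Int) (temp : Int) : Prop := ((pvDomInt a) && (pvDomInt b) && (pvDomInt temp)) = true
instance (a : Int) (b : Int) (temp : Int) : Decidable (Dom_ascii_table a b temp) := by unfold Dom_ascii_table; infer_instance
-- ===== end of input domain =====

-- B replaces A's recursion by one iterative accumulator loop over range(temp, 127) (simpler decomposition, same cost).

-- chr(n): exact for 0 ≤ n ≤ 0x10FFFF (Pre_ keeps 0 ≤ temp ≤ 127)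
def pyChr (n : Int) : String := String.ofList [Char.ofNat n.toNat]

-- ===== PORT A =====
-- A's recursion, with fuel (127 - temp).toNat: fuel 0 with temp ≠ 127 is where Python raises (outside Pre_)
def ascii_table_go (a : Int) (b : Int) : Nat → Int → String
  | fuel, temp =>
    if temp = 127 then PySem.Int.toStr temp ++ " - " ++ pyChr temp
    else
      match fuel with
      | 0 => ""  -- unreachable inside Pre_: Python never returns here
      | n + 1 =>
        if PySem.Int.mod (temp - a) 10 = 0 ∧ temp ≠ 32 then
          let el := PySem.Int.toStr temp ++ " - " ++ pyChr temp ++ " "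
          "\n" ++ el ++ ascii_table_go a b n (temp + 1)
        else
          let el := PySem.Int.toStr temp ++ " - " ++ pyChr temp ++ " "
          el ++ ascii_table_go a b n (temp + 1)

def ascii_table (a : Int) (b : Int) (temp : Int) : String :=
  ascii_table_go a b (127 - temp).toNat temp

-- ===== PORT B =====
def ascii_table_alt (a : Int) (b : Int) (temp : Int) : String :=
  let res := (PySem.List.pyRange temp 127 1).foldl
    (fun res t =>
      let el := PySem.Int.toStr t ++ " - " ++ pyChr t ++ " "
      res ++ (if PySem.Int.mod (t - a) 10 = 0 ∧ t ≠ 32 then "\n" ++ el else el)) ""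
  res ++ (PySem.Int.toStr 127 ++ " - " ++ pyChr 127)

-- ===== PRECONDITION & SPEC =====
-- Pre_: exactly where Python A returns; temp < 0 raises ValueError in chr, temp > 127 never reaches the base case.
def Pre_ascii_table (a : Int) (b : Int) (temp : Int) : Prop := 0 ≤ temp ∧ temp ≤ 127
instance (a : Int) (b : Int) (temp : Int) : Decidable (Pre_ascii_table a b temp) := by
  unfold Pre_ascii_table; infer_instance
def pvWitness_ascii_table : Int × Int × Int := (3, 0, 100)

def Spec_ascii_table (a : Int) (b : Int) (temp : Int) (out : String) : Prop := out = ascii_table_alt a b temp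
instance (a : Int) (b : Int) (temp : Int) (out : String) : Decidable (Spec_ascii_table a b temp out) := by unfold Spec_ascii_table; infer_instance

-- ===== CLAIM (what is proved, stated in full; the proofs are below) =====
def Claim_equal_ascii_table : Prop := ∀ (a : Int) (b : Int) (temp : Int), Dom_ascii_table a b temp → Pre_ascii_table a b temp → Spec_ascii_table a b temp (ascii_table a b temp)

-- ===== LEMMAS AND PROOFS =====

theorem foldl_str_shift (f : Int → String) (l : List Int) (acc : String) :
    l.foldl (fun r t => r ++ f t) acc = acc ++ l.foldl (fun r t => r ++ f t) "" := by
  induction l generalizing acc with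
  | nil => simp
  | cons x xs ih =>
    simp only [List.foldl_cons]
    rw [ih (acc ++ f x), ih ("" ++ f x)]
    simp [String.append_assoc]

theorem foldl_str_shift' (f : Int → String) (l : List Int) (x b : String) :
    l.foldl (fun r t => r ++ f t) x ++ b = x ++ (l.foldl (fun r t => r ++ f t) "" ++ b) := by
  rw [foldl_str_shift f l x]; simp [String.append_assoc]

theorem ascii_table_go_eq (a b : Int) (n : Nat) :
    ∀ temp : Int, temp ≤ 127 → (127 - temp).toNat = n →
      ascii_table_go a b n temp = ascii_table_alt a b temp := by
  induction n with
  | zero =>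
    intro temp h1 h2
    have ht : temp = 127 := by omega
    subst ht
    rw [ascii_table_go, ascii_table_alt]
    simp [PySem.List.pyRange_one_eq_nil (le_refl (127:Int))]
  | succ n ih =>
    intro temp h1 h2
    have hlt : temp < 127 := by omega
    have hne : ¬ temp = 127 := by omega
    rw [ascii_table_go, ascii_table_alt]
    simp only [hne, if_false]
    rw [ih (temp + 1) (by omega) (by omega), ascii_table_alt]
    rw [PySem.List.pyRange_one_cons hlt]
    simp only [List.foldl_cons]
    split_ifs with hc <;>
      (conv_rhs => rw [foldl_str_shift']) <;> simp [String.append_assoc]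

-- ===== VERDICT (by name: the statement is the Claim_ definition above) =====
theorem ascii_table_spec : Claim_equal_ascii_table := by
  intro a b temp _ hpre
  unfold Spec_ascii_table ascii_table
  exact ascii_table_go_eq a b (127 - temp).toNat temp hpre.2 rfl
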